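-- pv_equiv track=rewrite | github.com/Chandumeghanajogi/DSA_problems | Leetcode/leetcode8.py | sum_middle_elements
-- ===== SOURCE A (Python) =====
-- def sum_middle_elements(nums: list) -> int:
--     # your code here
--
--     sum1=0
--     num=nums.copy()
--     if len(nums)<3:
--         return 0
--     else:
--         num.remove(min(nums))
--         num.remove(max(nums))
--         for i in num:
--             sum1+=i
--     return sum1
-- ===== SOURCE B (Python) =====
-- def sum_middle_elements(nums: list) -> int:
--     if len(nums) < 3:
--         return 0
--     return sum(nums) - min(nums) - max(nums)
-- ===== Notes on version B (the rewrite author's own statement) =====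
-- stated objective: simpler
-- what changed: Replaces copy + two .remove calls + an accumulation loop with the closed form sum(nums) - min(nums) - max(nums) under the same len<3 guard.
import Mathlib
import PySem

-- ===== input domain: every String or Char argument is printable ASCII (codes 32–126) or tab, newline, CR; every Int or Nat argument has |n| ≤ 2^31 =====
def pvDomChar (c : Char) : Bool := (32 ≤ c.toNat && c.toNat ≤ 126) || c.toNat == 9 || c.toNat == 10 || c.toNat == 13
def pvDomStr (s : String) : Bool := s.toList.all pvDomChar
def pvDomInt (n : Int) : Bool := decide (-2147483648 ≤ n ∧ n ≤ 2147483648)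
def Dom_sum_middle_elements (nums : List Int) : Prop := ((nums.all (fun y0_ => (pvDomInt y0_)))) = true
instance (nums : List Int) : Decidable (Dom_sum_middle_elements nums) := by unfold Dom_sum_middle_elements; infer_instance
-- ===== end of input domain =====

-- B replaces A's copy + two .remove calls + accumulation loop with the closed form sum - min - max (simpler).


-- ===== PORT A =====
-- copy, remove min, remove max, then accumulate; the `none` branches of remove?/min?/max?
-- are unreachable when length ≥ 3 (Python would raise there, but never does).
def sum_middle_elements (nums : List Int) : Int :=
  let num := nums
  if nums.length < 3 then 0
  else
    match PySem.List.min? nums (fun y => y), PySem.List.max? nums (fun y => y) with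
    | some mn, some mx =>
      match PySem.List.remove? num mn with
      | some num1 =>
        match PySem.List.remove? num1 mx with
        | some num2 => num2.foldl (fun s i => s + i) 0
        | none => 0
      | none => 0
    | _, _ => 0

-- ===== PORT B =====
def sum_middle_elements_alt (nums : List Int) : Int :=
  if nums.length < 3 then 0
  else
    match PySem.List.min? nums (fun y => y) with
    | none => 0
    | some mn =>
      match PySem.List.max? nums (fun y => y) with
      | none => 0
      | some mx => nums.sum - mn - mx

-- ===== PRECONDITION & SPEC =====
def Spec_sum_middle_elements (nums : List Int) (out : Int) : Prop := out = sum_middle_elements_alt nums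
instance (nums : List Int) (out : Int) : Decidable (Spec_sum_middle_elements nums out) := by unfold Spec_sum_middle_elements; infer_instance

-- ===== CLAIM (what is proved, stated in full; the proofs are below) =====
def Claim_equal_sum_middle_elements : Prop := ∀ (nums : List Int), Dom_sum_middle_elements nums → Spec_sum_middle_elements nums (sum_middle_elements nums)

-- ===== LEMMAS AND PROOFS =====

theorem pv_foldl_add_eq_sum (l : List Int) (a : Int) : l.foldl (fun s i => s + i) a = a + l.sum := by
  induction l generalizing a with
  | nil => simp
  | cons x t ih => simp [List.foldl, ih]; ring

theorem pv_sum_erase {l : List Int} {a : Int} (h : a ∈ l) : (l.erase a).sum = l.sum - a := by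
  have hp := List.perm_cons_erase h
  have := hp.sum_eq
  simp at this
  omega

theorem sum_middle_elements_spec : Claim_equal_sum_middle_elements := by
  intro nums _
  unfold Spec_sum_middle_elements sum_middle_elements sum_middle_elements_alt
  by_cases hlen : nums.length < 3
  · simp [hlen]
  · simp only [hlen, if_false]
    have hne : nums ≠ [] := by
      intro h; subst h; simp at hlen
    obtain ⟨mn, hmn⟩ := Option.ne_none_iff_exists'.mp
      (fun h => hne ((PySem.List.min?_eq_none_iff nums (fun y => y)).mp h))
    obtain ⟨mx, hmx⟩ := Option.ne_none_iff_exists'.mp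
      (fun h => hne ((PySem.List.max?_eq_none_iff nums (fun y => y)).mp h))
    have hmnmem : mn ∈ nums := PySem.List.min?_mem hmn
    have hmxmem : mx ∈ nums := PySem.List.max?_mem hmx
    have hmin : ∀ y ∈ nums, mn ≤ y := PySem.List.min?_isMin hmn
    have hmax : ∀ y ∈ nums, y ≤ mx := PySem.List.max?_isMax hmx
    -- mx is still a member after erasing one occurrence of mn
    have hmxe : mx ∈ nums.erase mn := by
      by_cases hq : mx = mn
      · subst hq
        -- all elements equal mx; erase is nonempty (length ≥ 2)
        have hlen2 : (nums.erase mx).length = nums.length - 1 := List.length_erase_of_mem hmxmem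
        have hnil : nums.erase mx ≠ [] := by
          intro h
          have := congrArg List.length h
          simp [hlen2] at this
          omega
        obtain ⟨y, hy⟩ := List.exists_mem_of_ne_nil _ hnil
        have hyn : y ∈ nums := List.mem_of_mem_erase hy
        have : y = mx := le_antisymm (hmax y hyn) (hmin y hyn)
        rwa [this] at hy
      · exact (List.mem_erase_of_ne hq).mpr hmxmem
    simp only [hmn, hmx]
    simp only [PySem.List.remove?_eq_some_erase _ _ hmnmem,
               PySem.List.remove?_eq_some_erase _ _ hmxe]
    rw [pv_foldl_add_eq_sum, pv_sum_erase hmxe, pv_sum_erase hmnmem]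
    ring
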